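-- pv_equiv track=rewrite | github.com/pypi-data/pypi-mirror-182 | packages/measure-incremental-development/measure_incremental_development-1.0.1-py3-none-any.whl/measure_incremental_development/compute.py | match_adjusts_to_fp
-- ===== SOURCE A (Python) =====
-- def match_adjusts_to_fp(label_list, adjust_locs):
--     fp_step = 0
--     new_seq = []
--     for i in label_list:
--         if "FORWARD_PROG" in i:
--             new_seq.append(i)
--             num_adjusts = ["ADJUSTMENT" for subset in adjust_locs if fp_step in subset]
--             fp_step += 1
--             new_seq.extend(num_adjusts)
--     return new_seq
-- ===== SOURCE B (Python) =====
-- def match_adjusts_to_fp(label_list, adjust_locs):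
--     # Precompute, once, how many subsets contain each step index,
--     # then do a single pass over the labels.
--     counts = {}
--     for subset in adjust_locs:
--         for v in set(subset):
--             counts[v] = counts.get(v, 0) + 1
--     new_seq = []
--     fp_step = 0
--     for lab in label_list:
--         if "FORWARD_PROG" in lab:
--             new_seq.append(lab)
--             new_seq.extend(["ADJUSTMENT"] * counts.get(fp_step, 0))
--             fp_step += 1
--     return new_seq
-- ===== Notes on version B (the rewrite author's own statement) =====
-- stated objective: alternative
-- what changed: B precomputes a dict counting, for each integer, how many subsets contain it, so the per-step scan of all subsets disappears and the labels are processed in one pass with a single dict lookup per forward-progress step.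
import Mathlib
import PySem

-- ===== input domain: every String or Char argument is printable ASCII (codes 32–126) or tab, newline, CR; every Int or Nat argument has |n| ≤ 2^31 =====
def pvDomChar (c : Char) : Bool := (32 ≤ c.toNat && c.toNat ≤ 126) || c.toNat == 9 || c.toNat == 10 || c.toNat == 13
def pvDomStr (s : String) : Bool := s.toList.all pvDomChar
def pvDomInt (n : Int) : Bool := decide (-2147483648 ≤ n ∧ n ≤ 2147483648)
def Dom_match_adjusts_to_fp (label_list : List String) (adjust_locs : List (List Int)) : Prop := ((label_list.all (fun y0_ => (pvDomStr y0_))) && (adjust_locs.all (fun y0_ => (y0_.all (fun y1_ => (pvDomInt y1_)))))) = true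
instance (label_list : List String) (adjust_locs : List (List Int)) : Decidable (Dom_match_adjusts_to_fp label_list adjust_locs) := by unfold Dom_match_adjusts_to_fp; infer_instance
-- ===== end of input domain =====

-- B precomputes a dict of per-step membership counts across all subsets (one pass over
-- the subsets, then one pass over the labels) instead of rescanning every subset at each
-- forward-progress step (objective: alternative algorithm, same return value).

-- ===== PORT A =====
def match_adjusts_to_fp (label_list : List String) (adjust_locs : List (List Int)) : List String :=
  (label_list.foldl (fun (st : Int × List String) i =>
    if PySem.Str.isIn "FORWARD_PROG" i then
      let new_seq := st.2 ++ [i]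
      let num_adjusts := (adjust_locs.filter (fun subset => subset.contains st.1)).map
        (fun _ => "ADJUSTMENT")
      (st.1 + 1, new_seq ++ num_adjusts)
    else st) ((0 : Int), ([] : List String))).2

-- ===== PORT B =====
def match_adjusts_to_fp_alt (label_list : List String) (adjust_locs : List (List Int)) : List String :=
  let counts : PySem.Dict Int Int := adjust_locs.foldl (fun d subset =>
    (PySem.Set.ofList subset).foldl (fun (d : PySem.Dict Int Int) v =>
      d.insert v (d.getD v 0 + 1)) d) PySem.Dict.empty
  (label_list.foldl (fun (st : Int × List String) lab =>
    if PySem.Str.isIn "FORWARD_PROG" lab then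
      (st.1 + 1, (st.2 ++ [lab]) ++ PySem.List.pyRepeat ["ADJUSTMENT"] (counts.getD st.1 0))
    else st) ((0 : Int), ([] : List String))).2

-- ===== PRECONDITION & SPEC =====
def Spec_match_adjusts_to_fp (label_list : List String) (adjust_locs : List (List Int)) (out : List String) : Prop := out = match_adjusts_to_fp_alt label_list adjust_locs
instance (label_list : List String) (adjust_locs : List (List Int)) (out : List String) : Decidable (Spec_match_adjusts_to_fp label_list adjust_locs out) := by unfold Spec_match_adjusts_to_fp; infer_instance

-- ===== CLAIM (what is proved, stated in full; the proofs are below) =====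
def Claim_equal_match_adjusts_to_fp : Prop := ∀ (label_list : List String) (adjust_locs : List (List Int)), Dom_match_adjusts_to_fp label_list adjust_locs → Spec_match_adjusts_to_fp label_list adjust_locs (match_adjusts_to_fp label_list adjust_locs)

-- ===== LEMMAS AND PROOFS =====

-- The whole two-level counting fold is the counter of the dedup-flattened subsets.
lemma counts_eq_counter (adjust_locs : List (List Int)) :
    adjust_locs.foldl (fun d subset =>
      (PySem.Set.ofList subset).foldl (fun (d : PySem.Dict Int Int) v =>
        d.insert v (d.getD v 0 + 1)) d) PySem.Dict.empty
    = PySem.Dict.counter (adjust_locs.flatMap (fun s => PySem.Set.ofList s)) := by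
  rw [← PySem.Dict.foldl_insert_getD_add_one_eq_counter, List.foldl_flatMap]

-- In a dedup'd list each element occurs 0 or 1 times.
lemma count_ofList (s : List Int) (v : Int) :
    (PySem.Set.ofList s : List Int).count v = if s.contains v then 1 else 0 := by
  by_cases h : v ∈ s
  · rw [List.count_eq_one_of_mem (PySem.Set.nodup_ofList s) (by simpa [PySem.Set.mem_ofList] using h)]
    simp [h]
  · rw [List.count_eq_zero_of_not_mem (by simpa [PySem.Set.mem_ofList] using h)]
    simp [h]

-- The precomputed dict looks up exactly the number of subsets containing v.
lemma counts_getD (adjust_locs : List (List Int)) (v : Int) :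
    (adjust_locs.foldl (fun d subset =>
      (PySem.Set.ofList subset).foldl (fun (d : PySem.Dict Int Int) v =>
        d.insert v (d.getD v 0 + 1)) d) PySem.Dict.empty).getD v 0
    = (adjust_locs.countP (fun s => s.contains v) : Int) := by
  rw [counts_eq_counter, PySem.Dict.getD_counter]
  induction adjust_locs with
  | nil => simp
  | cons s rest ih =>
    simp only [List.flatMap_cons, List.count_append, List.countP_cons, count_ofList]
    push_cast [ih]
    by_cases h : s.contains v <;> simp only [h, if_true] <;> push_cast <;> ring

theorem match_adjusts_to_fp_spec : Claim_equal_match_adjusts_to_fp := by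
  intro label_list adjust_locs _
  unfold Spec_match_adjusts_to_fp match_adjusts_to_fp match_adjusts_to_fp_alt
  congr 2
  funext st lab
  simp [counts_getD, List.countP_eq_length_filter, List.append_assoc]
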